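-- pv_equiv track=rewrite | github.com/GKarmakar/siamese-lstm | siamese/loss.py | compute_output_shape
-- ===== SOURCE A (Python) =====
-- def compute_output_shape(input_shape):
--     output_shape = (1,)
--
--     batch_sizes = [s[0] for s in input_shape if s is not None]
--     batch_sizes = set(batch_sizes)
--     batch_sizes -= {None}
--     if len(batch_sizes) == 1:
--         output_shape = (list(batch_sizes)[0],) + output_shape
--     else:
--         output_shape = (None,) + output_shape
--     return output_shape
-- ===== SOURCE B (Python) =====
-- def compute_output_shape(input_shape):
--     cand = None
--     conflict = False
--     for s in input_shape:
--         if s is None or s[0] is None: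
--             continue
--         if cand is None:
--             cand = s[0]
--         elif s[0] != cand:
--             conflict = True
--     if cand is not None and not conflict:
--         return (cand, 1)
--     return (None, 1)
-- ===== Notes on version B (the rewrite author's own statement) =====
-- stated objective: simpler
-- what changed: Replaces the set-building pass plus len()/list-indexing with a single loop over input_shape maintaining one candidate batch size and a conflict flag.
import Mathlib
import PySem

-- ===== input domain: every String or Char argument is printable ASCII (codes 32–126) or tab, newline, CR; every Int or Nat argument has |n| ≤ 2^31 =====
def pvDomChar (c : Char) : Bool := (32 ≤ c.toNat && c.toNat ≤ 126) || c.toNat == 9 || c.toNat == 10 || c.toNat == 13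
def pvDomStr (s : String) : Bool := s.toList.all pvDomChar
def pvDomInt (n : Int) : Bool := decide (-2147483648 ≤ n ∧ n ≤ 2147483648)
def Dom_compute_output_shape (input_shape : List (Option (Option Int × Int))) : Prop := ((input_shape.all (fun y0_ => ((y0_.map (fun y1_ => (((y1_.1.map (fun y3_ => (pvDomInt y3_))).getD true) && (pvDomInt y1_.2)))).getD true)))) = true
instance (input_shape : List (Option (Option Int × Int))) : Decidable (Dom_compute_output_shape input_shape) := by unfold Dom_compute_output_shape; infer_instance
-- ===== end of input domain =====

-- B replaces A's set-building pass (set of first components, minus {None}, branch on its length)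
-- by one loop keeping a single candidate batch size and a conflict flag: simpler, one pass, no set.

-- ===== PORT A =====
def compute_output_shape (input_shape : List (Option (Option Int × Int))) : Option Int × Int :=
  -- output_shape = (1,)
  -- batch_sizes = [s[0] for s in input_shape if s is not None]
  let batch_sizes : List (Option Int) := input_shape.filterMap (fun s => s.map Prod.fst)
  -- batch_sizes = set(batch_sizes)
  let batch_sizes1 : PySem.Set (Option Int) := PySem.Set.ofList batch_sizes
  -- batch_sizes -= {None}
  let batch_sizes2 : PySem.Set (Option Int) := PySem.Set.diff batch_sizes1 (PySem.Set.ofList [(none : Option Int)])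
  if batch_sizes2.length == 1 then
    -- list(batch_sizes)[0]: iterates the set, but the set has exactly one element here, so exact
    (batch_sizes2.getD 0 none, 1)
  else
    ((none : Option Int), 1)

-- ===== PORT B =====
-- one loop step of Source B: skip None shapes and None batch sizes; record / compare the candidate
def cosAltStep (st : Option Int × Bool) (s : Option (Option Int × Int)) : Option Int × Bool :=
  match s with
  | none => st
  | some (none, _) => st
  | some (some b, _) =>
    match st with
    | (none, conflict) => (some b, conflict)
    | (some c, conflict) => if b ≠ c then (some c, true) else (some c, conflict)

def compute_output_shape_alt (input_shape : List (Option (Option Int × Int))) : Option Int × Int :=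
  match input_shape.foldl cosAltStep ((none : Option Int), false) with
  | (some c, false) => (some c, 1)
  | _ => ((none : Option Int), 1)

-- ===== PRECONDITION & SPEC =====
def Spec_compute_output_shape (input_shape : List (Option (Option Int × Int))) (out : Option Int × Int) : Prop := out = compute_output_shape_alt input_shape
instance (input_shape : List (Option (Option Int × Int))) (out : Option Int × Int) : Decidable (Spec_compute_output_shape input_shape out) := by unfold Spec_compute_output_shape; infer_instance

-- ===== CLAIM (what is proved, stated in full; the proofs are below) =====
def Claim_equal_compute_output_shape : Prop := ∀ (input_shape : List (Option (Option Int × Int))), Dom_compute_output_shape input_shape → Spec_compute_output_shape input_shape (compute_output_shape input_shape)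

-- ===== LEMMAS AND PROOFS =====

-- invariant tying A's set accumulator to B's (candidate, conflict) state
def cosInv (acc : List (Option Int)) (st : Option Int × Bool) : Prop :=
  match st with
  | (none, false) => acc.filter (fun x => x.isSome) = []
  | (some c, false) => acc.filter (fun x => x.isSome) = [some c]
  | (_, true) => 2 ≤ (acc.filter (fun x => x.isSome)).length

lemma cosStep (l : List (Option (Option Int × Int))) :
    ∀ (acc : List (Option Int)) (st : Option Int × Bool), cosInv acc st →
      cosInv ((l.filterMap (fun s => s.map Prod.fst)).foldl PySem.Set.add acc) (l.foldl cosAltStep st) := by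
  induction l with
  | nil => intro acc st h; simpa using h
  | cons s l ih =>
    intro acc st h
    match s with
    | none => simpa [cosAltStep] using ih acc st h
    | some (none, k) =>
      simp only [List.filterMap_cons, List.foldl_cons, Option.map_some, cosAltStep]
      apply ih
      -- adding `none` to the set does not change its isSome-filter
      have hfe : (PySem.Set.add acc none).filter (fun x : Option Int => x.isSome) =
          acc.filter (fun x : Option Int => x.isSome) := by
        unfold PySem.Set.add
        split <;> simp
      match st, h with
      | (none, false), h => simpa [cosInv, hfe] using h
      | (some c, false), h => simpa [cosInv, hfe] using h
      | (x, true), h => cases x <;> simpa [cosInv, hfe] using h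
    | some (some b, k) =>
      simp only [List.filterMap_cons, List.foldl_cons, Option.map_some, cosAltStep]
      apply ih
      match st, h with
      | (none, false), h =>
        simp only [cosInv] at h
        have hmem : (some b) ∉ acc := by
          intro hb
          have : (some b) ∈ acc.filter (fun x : Option Int => x.isSome) := by
            simp [List.mem_filter, hb]
          rw [h] at this; simp at this
        unfold PySem.Set.add PySem.Set.contains
        simp only [cosInv]
        simp [hmem, List.filter_append, h]
      | (some c, false), h =>
        by_cases hbc : b = c
        · subst hbc
          have hmem : (some b) ∈ acc := by
            have : (some b) ∈ acc.filter (fun x : Option Int => x.isSome) := by rw [h]; simp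
            exact (List.mem_filter.mp this).1
          unfold PySem.Set.add PySem.Set.contains
          simp only [cosInv] at h ⊢
          simp [hmem]
          exact h
        · have hmem : (some b) ∉ acc := by
            intro hb
            have : (some b) ∈ acc.filter (fun x : Option Int => x.isSome) := by
              simp [List.mem_filter, hb]
            rw [h] at this
            simp at this
            exact hbc this
          unfold PySem.Set.add PySem.Set.contains
          simp only [cosInv] at h ⊢
          simp [hbc, hmem, List.filter_append, h]
      | (x, true), h =>
        have hx : 2 ≤ (acc.filter (fun x : Option Int => x.isSome)).length := by
          cases x <;> simpa [cosInv] using h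
        have hlen : 2 ≤ ((PySem.Set.add acc (some b)).filter (fun x : Option Int => x.isSome)).length := by
          unfold PySem.Set.add
          split
          · exact hx
          · simp only [List.filter_append]
            calc 2 ≤ (acc.filter (fun x : Option Int => x.isSome)).length := hx
            _ ≤ _ := by simp
        cases x with
        | none => simpa [cosInv] using hlen
        | some c => by_cases hbc : b = c <;> simpa [cosInv, hbc] using hlen

-- the shape B's final branch selects from a loop state (proof-side helper)
def cosFin (st : Option Int × Bool) : Option Int × Int :=
  match st with
  | (some c, false) => (some c, (1 : Int))
  | _ => ((none : Option Int), (1 : Int))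

-- the final branch of each port, read off the invariant
lemma cosOut (acc : List (Option Int)) (st : Option Int × Bool) (h : cosInv acc st) :
    (if (PySem.Set.diff acc (PySem.Set.ofList [(none : Option Int)])).length == 1 then
      ((PySem.Set.diff acc (PySem.Set.ofList [(none : Option Int)])).getD 0 none, (1 : Int))
    else ((none : Option Int), (1 : Int)))
    = cosFin st := by
  have hd : PySem.Set.diff acc (PySem.Set.ofList [(none : Option Int)]) =
      acc.filter (fun x : Option Int => x.isSome) := by
    unfold PySem.Set.diff
    apply List.filter_congr
    intro x _
    cases x <;> rfl
  rw [hd]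
  match st, h with
  | (none, false), h =>
    simp only [cosInv] at h
    simp [cosFin, h]
  | (some c, false), h =>
    simp only [cosInv] at h
    simp [cosFin, h]
  | (x, true), h =>
    have hx : 2 ≤ (acc.filter (fun x : Option Int => x.isSome)).length := by
      cases x <;> simpa [cosInv] using h
    have hne : (acc.filter (fun x : Option Int => x.isSome)).length ≠ 1 := by omega
    cases x <;> simp [cosFin, hne]

-- ===== VERDICT (by name: the statement is the Claim_ definition above) =====
theorem compute_output_shape_spec : Claim_equal_compute_output_shape := by
  intro input_shape _
  unfold Spec_compute_output_shape
  show compute_output_shape input_shape = compute_output_shape_alt input_shape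
  simp only [compute_output_shape, compute_output_shape_alt]
  have h : cosInv (PySem.Set.ofList (input_shape.filterMap (fun s => s.map Prod.fst)))
      (input_shape.foldl cosAltStep ((none : Option Int), false)) :=
    cosStep input_shape [] ((none : Option Int), false) (by simp [cosInv])
  rw [cosOut _ _ h]
  cases hst : input_shape.foldl cosAltStep ((none : Option Int), false) with
  | mk c b => cases c <;> cases b <;> simp [cosFin]
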